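-- pv_equiv track=rewrite | github.com/ekansh-arora0/payguard-public | payguard_unified.py | _passes_alert_gate
-- ===== SOURCE A (Python) =====
-- def _passes_alert_gate(deduped):
--     """Category-aware alert gate. Lowered thresholds so real threats show alerts."""
--     if any(cat == 'URL_REPUTATION' for cat, _, _ in deduped):
--         return True
--     if any(cat in {'TEXT_ANALYSIS', 'TEXT_SCAM'} and conf >= 60 for cat, _, conf in deduped):
--         return True
--     # HTML structural analysis is high-confidence signal — allow at 50+
--     if any(cat in {'HTML_PHISHING'} and conf >= 50 for cat, _, conf in deduped):
--         return True
--     if any(cat in {'ML_HIGH_RISK', 'URL_PATTERN', 'HTML_SIGNALS'} and conf >= 60 for cat, _, conf in deduped):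
--         return True
--     top_conf = max((conf for _, _, conf in deduped), default=0)
--     return top_conf >= 50
-- ===== SOURCE B (Python) =====
-- def _passes_alert_gate(deduped):
--     """Category-aware alert gate, collapsed to one scan: the final max>=50
--     fallback subsumes every conf>=60/conf>=50 category clause."""
--     return any(cat == 'URL_REPUTATION' or conf >= 50 for cat, _, conf in deduped)
-- ===== Notes on version B (the rewrite author's own statement) =====
-- stated objective: simpler
-- what changed: The four separate any-passes and the trailing max(...)>=50 fallback collapse into a single scan testing cat=='URL_REPUTATION' or conf>=50 per element, since the max>=50 fallback subsumes every conf>=60/conf>=50 category clause.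
import Mathlib
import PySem

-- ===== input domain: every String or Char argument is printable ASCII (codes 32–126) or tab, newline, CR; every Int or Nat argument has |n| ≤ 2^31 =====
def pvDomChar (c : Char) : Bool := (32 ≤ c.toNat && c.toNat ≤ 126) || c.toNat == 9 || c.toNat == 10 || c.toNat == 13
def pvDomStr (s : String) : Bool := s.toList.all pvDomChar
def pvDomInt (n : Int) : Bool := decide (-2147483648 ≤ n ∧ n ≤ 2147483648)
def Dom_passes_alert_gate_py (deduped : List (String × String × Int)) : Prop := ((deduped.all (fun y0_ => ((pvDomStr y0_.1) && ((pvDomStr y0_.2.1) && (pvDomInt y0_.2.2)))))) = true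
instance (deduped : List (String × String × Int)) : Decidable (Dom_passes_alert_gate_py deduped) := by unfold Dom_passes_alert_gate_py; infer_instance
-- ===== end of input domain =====

-- B collapses A's four any-passes and the max(...)>=50 fallback into one scan; objective: simpler.

-- ===== PORT A =====
def passes_alert_gate_py (deduped : List (String × String × Int)) : Bool :=
  if deduped.any (fun t => t.1 == "URL_REPUTATION") then true
  else if deduped.any (fun t => (t.1 == "TEXT_ANALYSIS" || t.1 == "TEXT_SCAM") && decide (60 ≤ t.2.2)) then true
  else if deduped.any (fun t => (t.1 == "HTML_PHISHING") && decide (50 ≤ t.2.2)) then true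
  else if deduped.any (fun t => (t.1 == "ML_HIGH_RISK" || t.1 == "URL_PATTERN" || t.1 == "HTML_SIGNALS") && decide (60 ≤ t.2.2)) then true
  else
    let top_conf : Int := (PySem.List.max? (deduped.map (fun t => t.2.2)) (fun x => x)).getD 0
    decide (50 ≤ top_conf)

-- ===== PORT B =====
def passes_alert_gate_py_alt (deduped : List (String × String × Int)) : Bool :=
  deduped.any (fun t => t.1 == "URL_REPUTATION" || decide (50 ≤ t.2.2))

-- ===== PRECONDITION & SPEC =====
def Spec_passes_alert_gate_py (deduped : List (String × String × Int)) (out : Bool) : Prop := out = passes_alert_gate_py_alt deduped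
instance (deduped : List (String × String × Int)) (out : Bool) : Decidable (Spec_passes_alert_gate_py deduped out) := by unfold Spec_passes_alert_gate_py; infer_instance

-- ===== CLAIM (what is proved, stated in full; the proofs are below) =====
def Claim_equal_passes_alert_gate_py : Prop := ∀ (deduped : List (String × String × Int)), Dom_passes_alert_gate_py deduped → Spec_passes_alert_gate_py deduped (passes_alert_gate_py deduped)

-- ===== LEMMAS AND PROOFS =====

-- max(confs, default=0) >= 50 iff some conf >= 50 (since 0 < 50).
theorem pv_max_ge50_iff (l : List Int) :
    (50 ≤ (PySem.List.max? l (fun x => x)).getD 0) ↔ ∃ c ∈ l, (50 : Int) ≤ c := by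
  constructor
  · intro h
    cases hm : PySem.List.max? l (fun x => x) with
    | none => rw [hm] at h; simp at h
    | some m =>
      rw [hm] at h; simp at h
      exact ⟨m, PySem.List.max?_mem hm, h⟩
  · rintro ⟨c, hc, h50⟩
    cases hm : PySem.List.max? l (fun x => x) with
    | none =>
      rw [PySem.List.max?_eq_none_iff] at hm
      subst hm; simp at hc
    | some m =>
      have := PySem.List.max?_isMax hm c hc
      simp; omega

theorem pv_gate_eq (d : List (String × String × Int)) :
    passes_alert_gate_py d = passes_alert_gate_py_alt d := by
  rw [Bool.eq_iff_iff]
  unfold passes_alert_gate_py passes_alert_gate_py_alt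
  split_ifs with h1 h2 h3 h4 <;>
    simp only [List.any_eq_true, Bool.or_eq_true, Bool.and_eq_true, beq_iff_eq,
      decide_eq_true_eq] at *
  · obtain ⟨t, ht, hc⟩ := h1; exact iff_of_true trivial ⟨t, ht, Or.inl hc⟩
  · obtain ⟨t, ht, hc, h60⟩ := h2; exact iff_of_true trivial ⟨t, ht, Or.inr (by omega)⟩
  · obtain ⟨t, ht, hc, h50⟩ := h3; exact iff_of_true trivial ⟨t, ht, Or.inr h50⟩
  · obtain ⟨t, ht, hc, h60⟩ := h4; exact iff_of_true trivial ⟨t, ht, Or.inr (by omega)⟩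
  · rw [pv_max_ge50_iff]
    simp only [List.mem_map]
    constructor
    · rintro ⟨c, ⟨t, ht, rfl⟩, h50⟩; exact ⟨t, ht, Or.inr h50⟩
    · rintro ⟨t, ht, hcat | h50⟩
      · exact absurd ⟨t, ht, hcat⟩ h1
      · exact ⟨t.2.2, ⟨t, ht, rfl⟩, h50⟩

-- ===== VERDICT (by name: the statement is the Claim_ definition above) =====
theorem passes_alert_gate_py_spec : Claim_equal_passes_alert_gate_py := by
  intro d _
  exact pv_gate_eq d
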